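-- pv_equiv track=rewrite | github.com/srujanchikke/quali-bot | hs_indexer/find_impact.py | _build_name_index
-- ===== SOURCE A (Python) =====
-- def _build_name_index(fn_info: dict) -> dict:
--     """name → best fn_info entry (prefer crates/router over test/openapi)."""
--     idx: dict = {}
--     for info in fn_info.values():
--         name = info.get("name", "")
--         if not name:
--             continue
--         file = info.get("file") or ""
--         score = 0 if ("test" in file or "openapi" in file) else 1
--         existing = idx.get(name)
--         if existing is None:
--             idx[name] = info
--         else:
--             ex_score = 0 if ("test" in (existing.get("file") or "") or "openapi" in (existing.get("file") or "")) else 1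
--             if score > ex_score:
--                 idx[name] = info
--     return idx
-- ===== SOURCE B (Python) =====
-- def _build_name_index(fn_info: dict) -> dict:
--     """name → best fn_info entry (prefer crates/router over test/openapi)."""
--     groups: dict = {}
--     for info in fn_info.values():
--         name = info.get("name", "")
--         if name:
--             groups[name] = groups.get(name, []) + [info]
--
--     def pick(infos):
--         for info in infos:
--             file = info.get("file") or ""
--             if "test" not in file and "openapi" not in file:
--                 return info
--         return infos[0]
--
--     return {name: pick(infos) for name, infos in groups.items()}
-- ===== Notes on version B (the rewrite author's own statement) =====
-- stated objective: alternative
-- what changed: Replaces A's one-pass running best-so-far update (strict score comparison against the stored entry) with a two-pass group-then-select: bucket entries by name, then pick each bucket's first non-test/openapi entry, falling back to the bucket's first entry.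
import Mathlib
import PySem

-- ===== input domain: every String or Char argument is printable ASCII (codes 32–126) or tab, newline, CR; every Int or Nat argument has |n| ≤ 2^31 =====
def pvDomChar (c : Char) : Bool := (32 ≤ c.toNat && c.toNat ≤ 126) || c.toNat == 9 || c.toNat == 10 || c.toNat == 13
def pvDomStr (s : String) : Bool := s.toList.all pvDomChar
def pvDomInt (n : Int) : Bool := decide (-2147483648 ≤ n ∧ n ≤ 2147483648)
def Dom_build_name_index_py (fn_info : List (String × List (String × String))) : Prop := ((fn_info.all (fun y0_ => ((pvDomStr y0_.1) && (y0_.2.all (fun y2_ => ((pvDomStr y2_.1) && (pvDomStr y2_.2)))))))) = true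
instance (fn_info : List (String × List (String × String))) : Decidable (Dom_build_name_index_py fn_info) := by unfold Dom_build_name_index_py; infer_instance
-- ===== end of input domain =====

-- B re-implements A's one-pass running best-so-far update as a two-pass group-then-select
-- (bucket by name, then pick each bucket's first non-test/openapi entry, else its first);
-- same cost, different decomposition ('alternative').

-- ===== PORT A =====
-- info.get("name", "")
def pvName (info : List (String × String)) : String :=
  (PySem.Dict.ofList info).getD "name" ""

-- info.get("file") or ""   (None is not representable in the String type; missing → "")
def pvFile (info : List (String × String)) : String :=
  (PySem.Dict.ofList info).getD "file" ""

-- score = 0 if ("test" in file or "openapi" in file) else 1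
def pvScore (info : List (String × String)) : Int :=
  if PySem.Str.isIn "test" (pvFile info) || PySem.Str.isIn "openapi" (pvFile info) then 0 else 1

-- the body of A's loop over fn_info.values()
def pvStepA (idx : PySem.Dict String (List (String × String))) (info : List (String × String)) :
    PySem.Dict String (List (String × String)) :=
  let name := pvName info
  if name == "" then idx
  else
    match idx.get? name with
    | none => idx.insert name info
    | some existing => if pvScore info > pvScore existing then idx.insert name info else idx

def build_name_index_py (fn_info : List (String × List (String × String))) :
    List (String × List (String × String)) :=
  (((PySem.Dict.ofList fn_info).values).foldl pvStepA PySem.Dict.empty).items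

-- ===== PORT B =====
-- pick(infos): first info whose file avoids "test"/"openapi", else infos[0]
def pvPick (infos : List (List (String × String))) : List (String × String) :=
  match infos.find? (fun info => !(PySem.Str.isIn "test" (pvFile info) || PySem.Str.isIn "openapi" (pvFile info))) with
  | some info => info
  | none => infos.headD []

-- the body of B's grouping loop: groups[name] = groups.get(name, []) + [info]
def pvStepB (g : PySem.Dict String (List (List (String × String)))) (info : List (String × String)) :
    PySem.Dict String (List (List (String × String))) :=
  let name := pvName info
  if name == "" then g else g.insert name (g.getD name [] ++ [info])

def build_name_index_py_alt (fn_info : List (String × List (String × String))) :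
    List (String × List (String × String)) :=
  ((((PySem.Dict.ofList fn_info).values).foldl pvStepB PySem.Dict.empty).items).map
    (fun p => (p.1, pvPick p.2))

-- ===== PRECONDITION & SPEC =====
def Spec_build_name_index_py (fn_info : List (String × List (String × String))) (out : List (String × List (String × String))) : Prop := out = build_name_index_py_alt fn_info
instance (fn_info : List (String × List (String × String))) (out : List (String × List (String × String))) : Decidable (Spec_build_name_index_py fn_info out) := by unfold Spec_build_name_index_py; infer_instance

-- ===== CLAIM (what is proved, stated in full; the proofs are below) =====
def Claim_equal_build_name_index_py : Prop := ∀ (fn_info : List (String × List (String × String))), Dom_build_name_index_py fn_info → Spec_build_name_index_py fn_info (build_name_index_py fn_info)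

-- ===== LEMMAS AND PROOFS =====

-- "finalize": apply B's selection to every bucket, as a dict
def pvFinalize (g : PySem.Dict String (List (List (String × String)))) :
    PySem.Dict String (List (String × String)) :=
  PySem.Dict.mk (g.items.map (fun p => (p.1, pvPick p.2)))

theorem pvFinalize_get? (g : PySem.Dict String (List (List (String × String)))) (k : String) :
    (pvFinalize g).get? k = (g.get? k).map pvPick := by
  simp [pvFinalize, PySem.Dict.get?, List.find?_map, Function.comp_def]

theorem pvFinalize_keys (g : PySem.Dict String (List (List (String × String)))) :
    (pvFinalize g).keys = g.keys := by
  simp [pvFinalize, PySem.Dict.keys]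

theorem pvFinalize_contains (g : PySem.Dict String (List (List (String × String)))) (k : String) :
    (pvFinalize g).contains k = g.contains k := by
  rw [PySem.Dict.contains_eq_isSome_get?, PySem.Dict.contains_eq_isSome_get?, pvFinalize_get?]
  cases g.get? k <;> rfl

theorem pvFinalize_insert (g : PySem.Dict String (List (List (String × String))))
    (k : String) (v : List (List (String × String))) :
    pvFinalize (g.insert k v) = (pvFinalize g).insert k (pvPick v) := by
  unfold PySem.Dict.insert
  rw [pvFinalize_contains]
  by_cases h : g.contains k = true
  · simp only [h, if_pos]
    unfold pvFinalize
    simp only [List.map_map]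
    congr 1
    apply List.map_congr_left
    intro p _
    by_cases hk : p.1 = k <;> simp [hk]
  · simp only [h]
    unfold pvFinalize
    simp

theorem pvInsert_self_of_get? (d : PySem.Dict String (List (String × String)))
    (k : String) (v : List (String × String))
    (hnd : d.keys.Nodup) (h : d.get? k = some v) : d.insert k v = d := by
  have hc : d.contains k = true := by
    rw [PySem.Dict.contains_eq_isSome_get?, h]; rfl
  unfold PySem.Dict.insert
  rw [if_pos hc]
  apply PySem.Dict.ext
  simp only
  conv_rhs => rw [← List.map_id d.items]
  apply List.map_congr_left
  intro p hp
  obtain ⟨p1, p2⟩ := p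
  by_cases hk : p1 = k
  · subst hk
    have h2 := PySem.Dict.get?_of_mem_items (d := d) (k := p1) (v := p2) (by simpa using hp) hnd
    rw [h] at h2
    obtain rfl : v = p2 := by injection h2
    simp
  · simp [hk]

theorem pvPick_singleton (x : List (String × String)) : pvPick [x] = x := by
  unfold pvPick
  cases h : [x].find? (fun info => !(PySem.Str.isIn "test" (pvFile info) || PySem.Str.isIn "openapi" (pvFile info))) with
  | none => rfl
  | some y => simp [List.find?] at h; split at h <;> simp_all

theorem pvScore_of_good (x : List (String × String))
    (h : (!(PySem.Str.isIn "test" (pvFile x) || PySem.Str.isIn "openapi" (pvFile x))) = true) :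
    pvScore x = 1 := by
  unfold pvScore
  cases hc : (PySem.Str.isIn "test" (pvFile x) || PySem.Str.isIn "openapi" (pvFile x)) with
  | false => simp
  | true => rw [hc] at h; simp at h

theorem pvScore_of_bad (x : List (String × String))
    (h : (!(PySem.Str.isIn "test" (pvFile x) || PySem.Str.isIn "openapi" (pvFile x))) = false) :
    pvScore x = 0 := by
  unfold pvScore
  cases hc : (PySem.Str.isIn "test" (pvFile x) || PySem.Str.isIn "openapi" (pvFile x)) with
  | true => simp
  | false => rw [hc] at h; simp at h

theorem pvScore_le_one (x : List (String × String)) : pvScore x ≤ 1 := by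
  unfold pvScore; split <;> omega

-- selecting over a bucket extended on the right is exactly A's strict-> update rule
theorem pvPick_append (xs : List (List (String × String))) (info : List (String × String))
    (hxs : xs ≠ []) :
    pvPick (xs ++ [info]) =
      if pvScore info > pvScore (pvPick xs) then info else pvPick xs := by
  set good := fun i : List (String × String) =>
    !(PySem.Str.isIn "test" (pvFile i) || PySem.Str.isIn "openapi" (pvFile i)) with hgood
  cases h : xs.find? good with
  | some y =>
    have hy : good y = true := List.find?_some h
    have h1 : pvPick xs = y := by unfold pvPick; rw [← hgood, h]
    have h2 : pvPick (xs ++ [info]) = y := by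
      unfold pvPick; rw [← hgood, List.find?_append, h]; rfl
    rw [h1, h2, if_neg]
    have := pvScore_of_good y hy
    have := pvScore_le_one info
    omega
  | none =>
    have hall : ∀ x ∈ xs, good x = false := by
      intro x hx
      simpa using List.find?_eq_none.mp h x hx
    have h1 : pvPick xs = xs.headD [] := by unfold pvPick; rw [← hgood, h]
    have hscore0 : pvScore (pvPick xs) = 0 := by
      rw [h1]
      apply pvScore_of_bad
      apply hall
      cases xs with
      | nil => exact absurd rfl hxs
      | cons a l => simp
    cases hb : good info with
    | true =>
      have h2 : pvPick (xs ++ [info]) = info := by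
        unfold pvPick
        rw [← hgood, List.find?_append, h]
        simp [List.find?, hb]
      rw [h2, hscore0, if_pos]
      have := pvScore_of_good info hb
      omega
    | false =>
      have h2 : pvPick (xs ++ [info]) = pvPick xs := by
        unfold pvPick
        rw [← hgood, List.find?_append, h]
        simp only [List.find?, hb]
        cases xs with
        | nil => exact absurd rfl hxs
        | cons a l => rfl
      rw [h2, hscore0, if_neg]
      have := pvScore_of_bad info hb
      omega

-- one loop iteration commutes with finalize
theorem pvStep_comm (g : PySem.Dict String (List (List (String × String))))
    (info : List (String × String))
    (hnd : g.keys.Nodup) (hne : ∀ p ∈ g.items, p.2 ≠ []) :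
    pvStepA (pvFinalize g) info = pvFinalize (pvStepB g info) := by
  unfold pvStepA pvStepB
  by_cases hname : pvName info == ""
  · simp [hname]
  · simp only [hname, if_neg, Bool.not_eq_true]
    rw [pvFinalize_get?]
    cases h : g.get? (pvName info) with
    | none =>
      simp only [Option.map_none]
      rw [pvFinalize_insert]
      have hgd : g.getD (pvName info) [] = [] := by
        rw [PySem.Dict.getD_eq_get?_getD, h]; rfl
      rw [hgd, List.nil_append, pvPick_singleton]
    | some xs =>
      have hxs : xs ≠ [] := by
        have hmem : (pvName info, xs) ∈ g.items := PySem.Dict.mem_items_of_get?_eq_some g h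
        exact hne _ hmem
      simp only [Option.map_some]
      rw [pvFinalize_insert]
      have hgd : g.getD (pvName info) [] = xs := by
        rw [PySem.Dict.getD_eq_get?_getD, h]; rfl
      rw [hgd, pvPick_append xs info hxs]
      by_cases hsc : pvScore info > pvScore (pvPick xs)
      · simp [hsc]
      · simp only [hsc, if_false]
        rw [pvInsert_self_of_get?]
        · rw [pvFinalize_keys]; exact hnd
        · rw [pvFinalize_get?, h]; rfl

theorem pvStepB_nodup (g : PySem.Dict String (List (List (String × String))))
    (info : List (String × String)) (hnd : g.keys.Nodup) :
    (pvStepB g info).keys.Nodup := by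
  unfold pvStepB
  by_cases hname : pvName info == ""
  · simpa [hname] using hnd
  · simpa [hname] using PySem.Dict.nodup_keys_insert (d := g) (k := pvName info)
      (v := g.getD (pvName info) [] ++ [info]) hnd

theorem pvStepB_nonempty (g : PySem.Dict String (List (List (String × String))))
    (info : List (String × String)) (hne : ∀ p ∈ g.items, p.2 ≠ []) :
    ∀ p ∈ (pvStepB g info).items, p.2 ≠ [] := by
  intro p hp
  unfold pvStepB at hp
  by_cases hname : pvName info == ""
  · rw [if_pos hname] at hp
    exact hne _ hp
  · rw [if_neg hname] at hp
    rcases (PySem.Dict.mem_items_insert _ _ _ _).mp hp with h | ⟨h, _⟩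
    · subst h; simp
    · exact hne _ h

theorem pvFold_comm (l : List (List (String × String)))
    (g : PySem.Dict String (List (List (String × String))))
    (hnd : g.keys.Nodup) (hne : ∀ p ∈ g.items, p.2 ≠ []) :
    l.foldl pvStepA (pvFinalize g) = pvFinalize (l.foldl pvStepB g) := by
  induction l generalizing g with
  | nil => rfl
  | cons info l ih =>
    simp only [List.foldl_cons]
    rw [pvStep_comm g info hnd hne]
    exact ih _ (pvStepB_nodup g info hnd) (pvStepB_nonempty g info hne)

-- ===== VERDICT (by name: the statement is the Claim_ definition above) =====
theorem build_name_index_py_spec : Claim_equal_build_name_index_py := by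
  intro fn_info _
  unfold Spec_build_name_index_py build_name_index_py build_name_index_py_alt
  have h := pvFold_comm ((PySem.Dict.ofList fn_info).values) PySem.Dict.empty
    (by exact PySem.Dict.nodup_keys_empty) (by intro p hp; simp [PySem.Dict.empty] at hp)
  have hemp : pvFinalize PySem.Dict.empty = PySem.Dict.empty := rfl
  rw [hemp] at h
  rw [h]
  rfl
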